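-- pv_equiv track=rewrite | github.com/sainath3371/BTP | paper_model.py | get_indices
-- ===== SOURCE A (Python) =====
-- def get_indices(dataset, crop_size):
--     train_indices = []
--     test_indices = []
--     k = 0
--     size = (256 - crop_size + 1) * (256 - crop_size + 1)
--     for i in range(len(dataset) // size):
--         if i % 9 < 4:  # First 4 images for training, remaining for testing
--             for _ in range(size):
--                 train_indices.append(k)
--                 k += 1
--         else:
--             for _ in range(size):
--                 test_indices.append(k)
--                 k += 1
--     return train_indices, test_indices
-- ===== SOURCE B (Python) =====
-- def get_indices(dataset, crop_size):
--     size = (256 - crop_size + 1) ** 2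
--     num = len(dataset) // size
--     train_indices = []
--     test_indices = []
--     # process whole 9-block cycles: in each cycle the first 4 blocks are
--     # train, the rest test, so each contributes two contiguous index ranges
--     for c in range(0, num, 9):
--         split = min(c + 4, num)
--         stop = min(c + 9, num)
--         train_indices.extend(range(c * size, split * size))
--         test_indices.extend(range(split * size, stop * size))
--     return train_indices, test_indices
-- ===== Notes on version B (the rewrite author's own statement) =====
-- stated objective: alternative
-- what changed: Instead of A's per-block loop with a running counter k appending one index at a time, B walks 9-block cycles (range(0, num, 9)) and extends each output list with one whole contiguous range per cycle, computing the train/test split point of the cycle with min in closed form.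
import Mathlib
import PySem

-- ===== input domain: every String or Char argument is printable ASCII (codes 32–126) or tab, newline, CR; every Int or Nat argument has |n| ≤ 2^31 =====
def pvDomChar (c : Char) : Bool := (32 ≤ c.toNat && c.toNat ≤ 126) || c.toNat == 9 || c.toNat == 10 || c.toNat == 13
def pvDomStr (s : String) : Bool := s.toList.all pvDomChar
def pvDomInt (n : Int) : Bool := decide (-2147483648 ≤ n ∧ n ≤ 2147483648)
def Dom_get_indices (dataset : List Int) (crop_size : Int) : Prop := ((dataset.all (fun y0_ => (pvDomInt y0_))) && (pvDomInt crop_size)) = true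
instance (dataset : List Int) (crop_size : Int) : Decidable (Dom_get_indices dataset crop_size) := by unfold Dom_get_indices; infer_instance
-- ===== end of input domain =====

-- B replaces A's per-block loop with a running counter by a loop over 9-block cycles
-- that extends each output list with one whole contiguous range per cycle (alternative decomposition).

-- ===== PORT A =====
def get_indices (dataset : List Int) (crop_size : Int) : List Int × List Int :=
  let size := (256 - crop_size + 1) * (256 - crop_size + 1)
  let st :=
    (PySem.List.pyRange 0 (PySem.Int.floordiv (dataset.length : Int) size) 1).foldl
      (fun (st : List Int × List Int × Int) i =>
        if PySem.Int.mod i 9 < 4 then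
          (PySem.List.pyRange 0 size 1).foldl
            (fun st2 _ => (st2.1 ++ [st2.2.2], st2.2.1, st2.2.2 + 1)) st
        else
          (PySem.List.pyRange 0 size 1).foldl
            (fun st2 _ => (st2.1, st2.2.1 ++ [st2.2.2], st2.2.2 + 1)) st)
      ([], [], 0)
  (st.1, st.2.1)

-- ===== PORT B =====
def get_indices_alt (dataset : List Int) (crop_size : Int) : List Int × List Int :=
  let size := (256 - crop_size + 1) ^ 2
  let num := PySem.Int.floordiv (dataset.length : Int) size
  (PySem.List.pyRange 0 num 9).foldl
    (fun (st : List Int × List Int) c =>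
      (st.1 ++ PySem.List.pyRange (c * size) (min (c + 4) num * size) 1,
       st.2 ++ PySem.List.pyRange (min (c + 4) num * size) (min (c + 9) num * size) 1))
    ([], [])

-- ===== PRECONDITION & SPEC =====
-- Pre_ excludes crop_size = 257 only: there size = 0 and BOTH A and B raise ZeroDivisionError.
def Pre_get_indices (dataset : List Int) (crop_size : Int) : Prop := crop_size ≠ 257
instance (dataset : List Int) (crop_size : Int) : Decidable (Pre_get_indices dataset crop_size) := by unfold Pre_get_indices; infer_instance
def pvWitness_get_indices : List Int × Int := ([3, 1, 4, 1, 5, 9, 2, 6], 255)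

def Spec_get_indices (dataset : List Int) (crop_size : Int) (out : List Int × List Int) : Prop := out = get_indices_alt dataset crop_size
instance (dataset : List Int) (crop_size : Int) (out : List Int × List Int) : Decidable (Spec_get_indices dataset crop_size out) := by unfold Spec_get_indices; infer_instance

-- ===== CLAIM (what is proved, stated in full; the proofs are below) =====
def Claim_equal_get_indices : Prop := ∀ (dataset : List Int) (crop_size : Int), Dom_get_indices dataset crop_size → Pre_get_indices dataset crop_size → Spec_get_indices dataset crop_size (get_indices dataset crop_size)

-- ===== LEMMAS AND PROOFS =====

-- the two result lists after n whole blocks of width `size`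
def pvTr (size : Int) : Nat → List Int
  | 0 => []
  | n+1 => pvTr size n ++ (if PySem.Int.mod (n : Int) 9 < 4 then PySem.List.pyRange ((n : Int) * size) ((n : Int) * size + size) 1 else [])
def pvTe (size : Int) : Nat → List Int
  | 0 => []
  | n+1 => pvTe size n ++ (if PySem.Int.mod (n : Int) 9 < 4 then [] else PySem.List.pyRange ((n : Int) * size) ((n : Int) * size + size) 1)

-- A's inner loop, train branch: appends k..k+len-1 to the first list
lemma pvInnerTr (l : List Int) : ∀ (tr te : List Int) (k : Int),
    l.foldl (fun (st2 : List Int × List Int × Int) _ => (st2.1 ++ [st2.2.2], st2.2.1, st2.2.2 + 1)) (tr, te, k)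
      = (tr ++ PySem.List.pyRange k (k + l.length) 1, te, k + l.length) := by
  induction l with
  | nil => intro tr te k; simp [PySem.List.pyRange_one_eq_nil]
  | cons x xs ih =>
      intro tr te k
      rw [List.foldl_cons, ih]
      have hl : (((x :: xs).length : Nat) : Int) = (xs.length : Int) + 1 := by rw [List.length_cons]; push_cast; ring
      rw [hl, show k + ((xs.length : Int) + 1) = k + 1 + (xs.length : Int) from by ring]
      rw [PySem.List.pyRange_one_cons (show k < k + 1 + (xs.length : Int) from by
        have := Int.natCast_nonneg xs.length; omega)]
      simp
lemma pvInnerTe (l : List Int) : ∀ (tr te : List Int) (k : Int),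
    l.foldl (fun (st2 : List Int × List Int × Int) _ => (st2.1, st2.2.1 ++ [st2.2.2], st2.2.2 + 1)) (tr, te, k)
      = (tr, te ++ PySem.List.pyRange k (k + l.length) 1, k + l.length) := by
  induction l with
  | nil => intro tr te k; simp [PySem.List.pyRange_one_eq_nil]
  | cons x xs ih =>
      intro tr te k
      rw [List.foldl_cons, ih]
      have hl : (((x :: xs).length : Nat) : Int) = (xs.length : Int) + 1 := by rw [List.length_cons]; push_cast; ring
      rw [hl, show k + ((xs.length : Int) + 1) = k + 1 + (xs.length : Int) from by ring]
      rw [PySem.List.pyRange_one_cons (show k < k + 1 + (xs.length : Int) from by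
        have := Int.natCast_nonneg xs.length; omega)]
      simp

-- A's outer loop after n blocks
lemma pvAouter (size : Int) (hs : 0 < size) (n : Nat) :
    (PySem.List.pyRange 0 (n : Int) 1).foldl
      (fun (st : List Int × List Int × Int) i =>
        if PySem.Int.mod i 9 < 4 then
          (PySem.List.pyRange 0 size 1).foldl (fun st2 _ => (st2.1 ++ [st2.2.2], st2.2.1, st2.2.2 + 1)) st
        else
          (PySem.List.pyRange 0 size 1).foldl (fun st2 _ => (st2.1, st2.2.1 ++ [st2.2.2], st2.2.2 + 1)) st)
      ([], [], 0)
    = (pvTr size n, pvTe size n, (n : Int) * size) := by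
  have hlen : ((PySem.List.pyRange 0 size 1).length : Int) = size := by
    rw [PySem.List.length_pyRange_one]; omega
  induction n with
  | zero => simp [pvTr, pvTe, PySem.List.pyRange_one_eq_nil]
  | succ n ih =>
      have : ((n + 1 : Nat) : Int) = (n : Int) + 1 := by push_cast; ring
      rw [this, PySem.List.pyRange_one_succ_right (by positivity), List.foldl_append, ih]
      simp only [List.foldl_cons, List.foldl_nil]
      by_cases h : PySem.Int.mod (n : Int) 9 < 4
      · rw [if_pos h, pvInnerTr, hlen]
        simp only [pvTr, pvTe, if_pos h, List.append_nil]
        rw [show ((n : Int) + 1) * size = (n : Int) * size + size from by ring]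
      · rw [if_neg h, pvInnerTe, hlen]
        simp only [pvTr, pvTe, if_neg h, List.append_nil]
        rw [show ((n : Int) + 1) * size = (n : Int) * size + size from by ring]

-- range with step 9: nil and cons unfolding
lemma pvRange9_nil (a b : Int) (h : b ≤ a) : PySem.List.pyRange a b 9 = [] := by
  rw [PySem.List.pyRange_of_pos a b (by norm_num)]
  rw [if_neg (by omega)]
  simp
lemma pvRange9_cons (a b : Int) (h : a < b) :
    PySem.List.pyRange a b 9 = a :: PySem.List.pyRange (a + 9) b 9 := by
  rw [PySem.List.pyRange_of_pos a b (by norm_num), PySem.List.pyRange_of_pos (a + 9) b (by norm_num)]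
  by_cases h9 : a + 9 < b
  · rw [if_pos h, if_pos h9]
    have hm : ((b - a + 9 - 1) / 9).toNat = ((b - (a + 9) + 9 - 1) / 9).toNat + 1 := by omega
    rw [hm, List.range_succ_eq_map, List.map_cons, List.map_map]
    congr 1
    · simp
    · apply List.map_congr_left
      intro k _
      simp [Function.comp]
      ring
  · rw [if_pos h, if_neg h9]
    have hm : ((b - a + 9 - 1) / 9).toNat = 1 := by omega
    rw [hm]
    simp

-- one 9-block cycle, block-wise: blocks c..c+min(j,4)-1 go to train, the rest to test
lemma pvCycle (size : Int) (hs : 0 < size) (c : Nat) (hc : 9 ∣ c) :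
    ∀ j : Nat, j ≤ 9 →
      pvTr size (c + j) = pvTr size c ++ PySem.List.pyRange ((c : Int) * size) (((c : Int) + min (j : Int) 4) * size) 1
      ∧ pvTe size (c + j) = pvTe size c ++ PySem.List.pyRange (((c : Int) + min (j : Int) 4) * size) (((c : Int) + (j : Int)) * size) 1 := by
  intro j
  induction j with
  | zero =>
      intro _
      simp [PySem.List.pyRange_one_eq_nil]
  | succ j ih =>
      intro hj9
      obtain ⟨ihTr, ihTe⟩ := ih (by omega)
      have hmod : PySem.Int.mod ((c : Int) + (j : Int)) 9 = (j : Int) := by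
        obtain ⟨t, ht⟩ := hc
        rw [PySem.Int.mod_eq_emod_of_pos (by norm_num)]
        omega
      have hcast : ((c + (j + 1) : Nat) : Int) = (c : Int) + (j : Int) + 1 := by push_cast; ring
      have hstep : pvTr size (c + (j + 1)) = pvTr size (c + j) ++ (if PySem.Int.mod ((c : Int) + (j : Int)) 9 < 4 then PySem.List.pyRange (((c : Int) + (j : Int)) * size) (((c : Int) + (j : Int)) * size + size) 1 else [])
          ∧ pvTe size (c + (j + 1)) = pvTe size (c + j) ++ (if PySem.Int.mod ((c : Int) + (j : Int)) 9 < 4 then [] else PySem.List.pyRange (((c : Int) + (j : Int)) * size) (((c : Int) + (j : Int)) * size + size) 1) := by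
        have h1 : c + (j + 1) = (c + j) + 1 := by omega
        rw [h1]
        constructor <;> simp [pvTr, pvTe, Nat.cast_add]
      by_cases h4 : j < 4
      · have hlt : PySem.Int.mod ((c : Int) + (j : Int)) 9 < 4 := by rw [hmod]; omega
        have hminj : min (j : Int) 4 = (j : Int) := by omega
        have hminj1 : min ((j : Int) + 1) 4 = (j : Int) + 1 := by omega
        refine ⟨?_, ?_⟩
        · push_cast
          rw [hstep.1, if_pos hlt, ihTr, List.append_assoc, hminj, hminj1]
          congr 1
          rw [show ((c : Int) + ((j : Int) + 1)) * size = ((c : Int) + (j : Int)) * size + size from by ring]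
          exact (PySem.List.pyRange_one_append ((c : Int) * size) (((c : Int) + (j : Int)) * size) (((c : Int) + (j : Int)) * size + size)
              (by have h : (c : Int) ≤ (c : Int) + (j : Int) := by omega
                  exact mul_le_mul_of_nonneg_right h (le_of_lt hs))
              (by omega)).symm
        · push_cast
          rw [hstep.2, if_pos hlt, ihTe, List.append_nil, hminj, hminj1]
          rw [PySem.List.pyRange_one_eq_nil (le_refl _), PySem.List.pyRange_one_eq_nil (le_refl _)]
      · have hge : ¬ PySem.Int.mod ((c : Int) + (j : Int)) 9 < 4 := by rw [hmod]; omega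
        have hminj : min (j : Int) 4 = 4 := by omega
        have hminj1 : min ((j : Int) + 1) 4 = 4 := by omega
        refine ⟨?_, ?_⟩
        · push_cast
          rw [hstep.1, if_neg hge, List.append_nil, ihTr, hminj, hminj1]
        · push_cast
          rw [hstep.2, if_neg hge, ihTe, List.append_assoc, hminj, hminj1]
          congr 1
          rw [show ((c : Int) + ((j : Int) + 1)) * size = ((c : Int) + (j : Int)) * size + size from by ring]
          exact (PySem.List.pyRange_one_append (((c : Int) + 4) * size) (((c : Int) + (j : Int)) * size) (((c : Int) + (j : Int)) * size + size)
              (by have h : (c : Int) + 4 ≤ (c : Int) + (j : Int) := by omega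
                  exact mul_le_mul_of_nonneg_right h (le_of_lt hs))
              (by omega)).symm

-- B's loop over whole 9-block cycles, with fuel q
lemma pvBcycles (size : Int) (hs : 0 < size) (N : Nat) :
    ∀ (q c : Nat), 9 ∣ c → c ≤ N → N ≤ c + 9 * q →
      (PySem.List.pyRange (c : Int) (N : Int) 9).foldl
        (fun (st : List Int × List Int) x =>
          (st.1 ++ PySem.List.pyRange (x * size) (min (x + 4) (N : Int) * size) 1,
           st.2 ++ PySem.List.pyRange (min (x + 4) (N : Int) * size) (min (x + 9) (N : Int) * size) 1))
        (pvTr size c, pvTe size c)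
      = (pvTr size N, pvTe size N) := by
  intro q
  induction q with
  | zero =>
      intro c hc hle hfuel
      have : c = N := by omega
      subst this
      rw [pvRange9_nil _ _ (le_refl _)]
      simp
  | succ q ih =>
      intro c hc hle hfuel
      by_cases hlt : c < N
      · rw [pvRange9_cons _ _ (by exact_mod_cast hlt), List.foldl_cons]
        set d : Nat := min 9 (N - c) with hd
        have hd9 : d ≤ 9 := by omega
        obtain ⟨hTr, hTe⟩ := pvCycle size hs c hc d hd9
        have hsplit : min ((c : Int) + 4) (N : Int) = (c : Int) + min (d : Int) 4 := by
          push_cast [hd]; omega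
        have hstop : min ((c : Int) + 9) (N : Int) = (c : Int) + (d : Int) := by
          push_cast [hd]; omega
        rw [hsplit, hstop, ← hTr, ← hTe]
        by_cases h9 : c + 9 ≤ N
        · have hdd : c + d = c + 9 := by omega
          rw [hdd]
          have := ih (c + 9) (by omega) h9 (by omega)
          rw [show ((c + 9 : Nat) : Int) = (c : Int) + 9 from by push_cast; ring] at this
          exact this
        · have hdd : c + d = N := by omega
          rw [hdd, pvRange9_nil _ _ (by omega)]
          simp
      · have : c = N := by omega
        subst this
        rw [pvRange9_nil _ _ (le_refl _)]
        simp

-- ===== VERDICT (by name: the statement is the Claim_ definition above) =====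
theorem get_indices_spec : Claim_equal_get_indices := by
  intro dataset crop_size _ hpre
  simp only [Spec_get_indices, get_indices, get_indices_alt]
  have hsq : (256 - crop_size + 1) ^ 2 = (256 - crop_size + 1) * (256 - crop_size + 1) := by ring
  rw [hsq]
  set size := (256 - crop_size + 1) * (256 - crop_size + 1) with hsize
  have hs : 0 < size := by
    have h : 256 - crop_size + 1 ≠ 0 := by unfold Pre_get_indices at hpre; omega
    exact mul_self_pos.mpr h
  set num := PySem.Int.floordiv (dataset.length : Int) size with hnum
  have hnn : 0 ≤ num := by
    rw [hnum, PySem.Int.floordiv_eq_ediv_of_pos hs]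
    exact Int.ediv_nonneg (by positivity) (le_of_lt hs)
  have hcast : num = ((num.toNat : Nat) : Int) := by omega
  rw [hcast, pvAouter size hs num.toNat]
  have := pvBcycles size hs num.toNat num.toNat 0 (by omega) (by omega) (by omega)
  simp only [pvTr, pvTe, Nat.cast_zero] at this
  rw [this]
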